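-- pv_equiv track=rewrite | github.com/gaminKim/Algorithm-Study | 2022/3월/20220320/박다정/p_2.py | get_all_distance
-- ===== SOURCE A (Python) =====
-- def get_distance(x1, y1, x2, y2):
--     return abs(x1 - x2) + abs(y1 - y2)
--
-- def rotate_chicken_house(orders, chicken_houses, x, y):
--     distance = 100000000000
--
--     for i in range(len(orders)):
--         chicken_x, chicken_y = chicken_houses[orders[i]]
--         distance = min(distance, get_distance(x, y, chicken_x, chicken_y))
--
--     return distance
--
-- def get_all_distance(chicken_house, towns, all_case):
--     result = []
--
--     for chicken in all_case:
--         distance = 0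
--
--         for i in range(len(towns)):
--             for j in range(len(towns)):
--                 if towns[i][j] == 1:
--                     distance += rotate_chicken_house(chicken, chicken_house, i, j)
--         result.append(distance)
--     return result
-- ===== SOURCE B (Python) =====
-- def get_all_distance(chicken_house, towns, all_case):
--     # Precompute a house x chicken distance table once; each case is then a
--     # vector min-reduction over its chicken columns followed by one sum.
--     n = len(towns)
--     houses = [(i, j) for i, row in enumerate(towns) for j, v in enumerate(row[:n]) if v == 1]
--     if not houses:
--         return [0] * len(all_case)
--     dist = [[abs(x - cx) + abs(y - cy) for (x, y) in houses] for (cx, cy) in chicken_house]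
--     result = []
--     for case in all_case:
--         best = [100000000000] * len(houses)
--         for k in case:
--             best = [min(b, d) for b, d in zip(best, dist[k])]
--         result.append(sum(best))
--     return result
-- ===== Notes on version B (the rewrite author's own statement) =====
-- stated objective: faster
-- what changed: B precomputes a house-by-chicken distance table once and computes each case by a vector min-reduction over that case's precomputed columns followed by one sum, instead of A's per-case rescan of the whole n*n grid with an inner min-loop per cell.
import Mathlib
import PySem

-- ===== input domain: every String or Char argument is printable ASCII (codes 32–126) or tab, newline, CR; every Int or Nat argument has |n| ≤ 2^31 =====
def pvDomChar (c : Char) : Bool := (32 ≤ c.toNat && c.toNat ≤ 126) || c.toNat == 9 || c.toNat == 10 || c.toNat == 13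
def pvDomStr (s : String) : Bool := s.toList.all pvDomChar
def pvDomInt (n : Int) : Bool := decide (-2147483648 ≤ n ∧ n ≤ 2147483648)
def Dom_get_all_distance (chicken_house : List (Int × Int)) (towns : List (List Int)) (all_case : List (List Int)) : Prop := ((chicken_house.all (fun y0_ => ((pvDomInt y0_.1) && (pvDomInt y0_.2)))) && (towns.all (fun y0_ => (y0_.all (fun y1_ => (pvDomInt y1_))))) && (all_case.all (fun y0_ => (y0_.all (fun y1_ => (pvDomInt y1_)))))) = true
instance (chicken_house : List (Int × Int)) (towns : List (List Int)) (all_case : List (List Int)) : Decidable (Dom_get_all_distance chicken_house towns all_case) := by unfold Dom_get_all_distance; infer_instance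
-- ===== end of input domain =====

-- B precomputes a house×chicken distance table once and turns each case into a vector
-- min-reduction over its chicken columns followed by one sum (no per-case grid rescan).

-- ===== PORT A =====
def get_distance (x1 y1 x2 y2 : Int) : Int := |x1 - x2| + |y1 - y2|

-- chicken_houses[orders[i]]: out-of-range index is an IndexError in Python, excluded by Pre_; the getD default is never reached inside Pre_
def rotate_chicken_house (orders : List Int) (chicken_houses : List (Int × Int)) (x y : Int) : Int :=
  orders.foldl (fun distance k =>
    let c := (PySem.List.pyGet? chicken_houses k).getD (0, 0)
    min distance (get_distance x y c.1 c.2)) 100000000000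

-- towns[i][j]: a row shorter than len(towns) is an IndexError in Python, excluded by Pre_; the getD defaults are never reached inside Pre_
def get_all_distance (chicken_house : List (Int × Int)) (towns : List (List Int)) (all_case : List (List Int)) : List Int :=
  let n : Int := towns.length
  all_case.map (fun chicken =>
    (PySem.List.pyRange 0 n 1).foldl (fun distance i =>
      (PySem.List.pyRange 0 n 1).foldl (fun distance j =>
        if (PySem.List.pyGet? ((PySem.List.pyGet? towns i).getD []) j).getD 0 = 1 then
          distance + rotate_chicken_house chicken chicken_house i j
        else distance) distance) 0)

-- ===== PORT B =====
-- '[(i, j) for i, row in enumerate(towns) for j, v in enumerate(row[:n]) if v == 1]';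
-- row[:n] with n = len(towns) ≥ 0 is exactly 'row.take n'
def pv_housesB (towns : List (List Int)) : List (Int × Int) :=
  (PySem.List.enumerate towns 0).flatMap (fun ir =>
    (PySem.List.enumerate (ir.2.take towns.length) 0).filterMap (fun jv =>
      if jv.2 = 1 then some (ir.1, jv.1) else none))

-- dist[k] with a possibly negative Python index: PySem.List.pyGet?; its getD default is never reached inside Pre_
def get_all_distance_alt (chicken_house : List (Int × Int)) (towns : List (List Int)) (all_case : List (List Int)) : List Int :=
  let houses := pv_housesB towns
  if houses = [] then List.replicate all_case.length 0
  else
    let dist : List (List Int) :=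
      chicken_house.map (fun c => houses.map (fun xy => |xy.1 - c.1| + |xy.2 - c.2|))
    all_case.map (fun case_ =>
      (case_.foldl (fun best k => List.zipWith min best ((PySem.List.pyGet? dist k).getD []))
        (List.replicate houses.length 100000000000)).sum)

-- ===== PRECONDITION & SPEC =====
-- Pre_ excludes exactly the inputs where the Python A raises: with a nonempty all_case, a town row
-- shorter than len(towns) (IndexError on towns[i][j]), or — when some in-square cell is 1 — a chicken
-- index outside Python's valid range (IndexError in rotate_chicken_house). With all_case == [] A
-- returns [] whatever the grid looks like, and so does B.
def Pre_get_all_distance (chicken_house : List (Int × Int)) (towns : List (List Int)) (all_case : List (List Int)) : Prop :=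
  all_case = [] ∨
  ((∀ row ∈ towns, towns.length ≤ row.length) ∧
   ((∃ row ∈ towns, 1 ∈ row.take towns.length) →
     ∀ c ∈ all_case, ∀ k ∈ c, -(chicken_house.length : Int) ≤ k ∧ k < (chicken_house.length : Int)))
instance (chicken_house : List (Int × Int)) (towns : List (List Int)) (all_case : List (List Int)) : Decidable (Pre_get_all_distance chicken_house towns all_case) := by unfold Pre_get_all_distance; infer_instance

def pvWitness_get_all_distance : (List (Int × Int)) × List (List Int) × List (List Int) :=
  ([(0, 2)], [[1, 0], [0, 1]], [[0], [-1]])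

def Spec_get_all_distance (chicken_house : List (Int × Int)) (towns : List (List Int)) (all_case : List (List Int)) (out : List Int) : Prop := out = get_all_distance_alt chicken_house towns all_case
instance (chicken_house : List (Int × Int)) (towns : List (List Int)) (all_case : List (List Int)) (out : List Int) : Decidable (Spec_get_all_distance chicken_house towns all_case out) := by unfold Spec_get_all_distance; infer_instance

-- ===== CLAIM (what is proved, stated in full; the proofs are below) =====
def Claim_equal_get_all_distance : Prop := ∀ (chicken_house : List (Int × Int)) (towns : List (List Int)) (all_case : List (List Int)), Dom_get_all_distance chicken_house towns all_case → Pre_get_all_distance chicken_house towns all_case → Spec_get_all_distance chicken_house towns all_case (get_all_distance chicken_house towns all_case)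

-- ===== LEMMAS AND PROOFS =====

-- the grid cell towns[i][j] as A's port reads it (totalised)
def pv_cell (towns : List (List Int)) (i j : Int) : Int :=
  (PySem.List.pyGet? ((PySem.List.pyGet? towns i).getD []) j).getD 0

-- A's house list, read off the grid scan in range order
def pv_housesA (towns : List (List Int)) : List (Int × Int) :=
  (PySem.List.pyRange 0 (towns.length : Int) 1).flatMap (fun i =>
    (PySem.List.pyRange 0 (towns.length : Int) 1).filterMap (fun j =>
      if pv_cell towns i j = 1 then some (i, j) else none))

-- a conditional-accumulate fold is the start value plus the sum of the selected summands
theorem pv_foldl_condAdd (P : Int → Prop) [DecidablePred P] (f : Int → Int) :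
    ∀ (l : List Int) (d : Int),
      l.foldl (fun d j => if P j then d + f j else d) d
        = d + (l.filterMap (fun j => if P j then some (f j) else none)).sum := by
  intro l
  induction l with
  | nil => intro d; simp
  | cons x xs ih =>
    intro d
    by_cases h : P x <;> simp [h, ih, add_assoc]

-- a plain accumulate fold is the start value plus the sum of the mapped list
theorem pv_foldl_sumAdd {α : Type} (M : α → Int) :
    ∀ (l : List α) (t : Int), l.foldl (fun t x => t + M x) t = t + (l.map M).sum := by
  intro l
  induction l with
  | nil => intro t; simp
  | cons x xs ih => intro t; simp [ih, add_assoc]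

-- the sum of a flattened list is the sum of the per-block sums
theorem pv_sum_flatMap {α : Type} (g : α → List Int) :
    ∀ (l : List α), (l.flatMap g).sum = (l.map (fun a => (g a).sum)).sum := by
  intro l
  induction l with
  | nil => simp
  | cons x xs ih => simp [ih]

-- A's per-case grid fold is the sum of f over A's house list
theorem pv_Acase (towns : List (List Int)) (f : Int → Int → Int) :
    (PySem.List.pyRange 0 (towns.length : Int) 1).foldl (fun distance i =>
      (PySem.List.pyRange 0 (towns.length : Int) 1).foldl (fun distance j =>
        if pv_cell towns i j = 1 then distance + f i j else distance) distance) 0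
    = ((pv_housesA towns).map (fun xy => f xy.1 xy.2)).sum := by
  set n : Int := (towns.length : Int)
  calc
    (PySem.List.pyRange 0 n 1).foldl (fun distance i =>
        (PySem.List.pyRange 0 n 1).foldl (fun distance j =>
          if pv_cell towns i j = 1 then distance + f i j else distance) distance) 0
      = (PySem.List.pyRange 0 n 1).foldl (fun distance i =>
          distance + ((PySem.List.pyRange 0 n 1).filterMap (fun j =>
            if pv_cell towns i j = 1 then some (f i j) else none)).sum) 0 := by
        apply List.foldl_ext
        intro d i _
        exact pv_foldl_condAdd (fun j => pv_cell towns i j = 1) (fun j => f i j) _ d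
    _ = ((PySem.List.pyRange 0 n 1).map (fun i =>
          ((PySem.List.pyRange 0 n 1).filterMap (fun j =>
            if pv_cell towns i j = 1 then some (f i j) else none)).sum)).sum := by
        rw [pv_foldl_sumAdd]; simp
    _ = _ := by
        unfold pv_housesA
        rw [List.map_flatMap, pv_sum_flatMap]
        apply congrArg
        apply List.map_congr_left
        intro i _
        apply congrArg
        rw [List.map_filterMap]
        apply List.filterMap_congr
        intro j _
        by_cases h : pv_cell towns i j = 1 <;> simp [h]

-- pyGet? commutes with map
theorem pv_pyGet?_map {α β : Type} (g : α → β) (l : List α) (i : Int) :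
    PySem.List.pyGet? (l.map g) i = (PySem.List.pyGet? l i).map g := by
  simp [PySem.List.pyGet?, PySem.List.pyIdx?]

-- zipWith over two maps of the same list is a single map
theorem pv_zipWith_map_same {α : Type} (g h : α → Int) :
    ∀ (l : List α), List.zipWith min (l.map g) (l.map h) = l.map (fun a => min (g a) (h a)) := by
  intro l
  induction l with
  | nil => simp
  | cons x xs ih => simp [ih]

-- the vector min-reduction over columns that are maps of one list is a per-element fold
theorem pv_zipfold {α : Type} (col : Int → List Int) (F : Int → α → Int) :
    ∀ (case_ : List Int) (hs : List α) (g : α → Int),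
      (∀ k ∈ case_, col k = hs.map (F k)) →
      case_.foldl (fun best k => List.zipWith min best (col k)) (hs.map g)
        = hs.map (fun h => case_.foldl (fun b k => min b (F k h)) (g h)) := by
  intro case_
  induction case_ with
  | nil => intro hs g _; simp
  | cons k ks ih =>
    intro hs g hcol
    simp only [List.foldl_cons]
    rw [hcol k (List.mem_cons_self), pv_zipWith_map_same,
        ih hs (fun a => min (g a) (F k a)) (fun k' hk' => hcol k' (List.mem_cons_of_mem _ hk'))]

-- flatMap congruence on the underlying list
theorem pv_flatMap_congr {α β : Type} {l : List α} {f g : α → List β}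
    (h : ∀ a ∈ l, f a = g a) : l.flatMap f = l.flatMap g := by
  induction l with
  | nil => simp
  | cons x xs ih =>
    simp only [List.flatMap_cons, h x (List.mem_cons_self)]
    rw [ih (fun a ha => h a (List.mem_cons_of_mem _ ha))]

-- B's house list equals A's when every row is long enough
theorem pv_houses_eq (towns : List (List Int))
    (hrows : ∀ row ∈ towns, towns.length ≤ row.length) :
    pv_housesB towns = pv_housesA towns := by
  unfold pv_housesB pv_housesA
  rw [PySem.List.enumerate_eq_map_pyRange towns ([] : List Int), List.flatMap_map]
  simp only [PySem.List.len_eq]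
  apply pv_flatMap_congr
  intro i hi
  rw [PySem.List.mem_pyRange_one] at hi
  have h0 : (0:Int) ≤ i := hi.1
  have h1 : i < (towns.length : Int) := hi.2
  have hrow : PySem.List.pyGetD towns i ([] : List Int) = towns[i.toNat] :=
    PySem.List.pyGetD_eq_getElem _ _ h0 (by simpa using h1)
  have hlen : towns.length ≤ towns[i.toNat].length := hrows _ (List.getElem_mem _)
  have htake : (towns[i.toNat].take towns.length).length = towns.length := by
    simp [List.length_take, Nat.min_eq_left hlen]
  rw [hrow, PySem.List.enumerate_eq_map_pyRange (towns[i.toNat].take towns.length) (0 : Int), List.filterMap_map,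
      PySem.List.len_eq, htake]
  apply List.filterMap_congr
  intro j hj
  rw [PySem.List.mem_pyRange_one] at hj
  have hj0 : (0:Int) ≤ j := hj.1
  have hj1 : j.toNat < towns.length := by omega
  have hjr : j.toNat < towns[i.toNat].length := lt_of_lt_of_le hj1 hlen
  have hcell : pv_cell towns i j = towns[i.toNat][j.toNat] := by
    unfold pv_cell
    rw [PySem.List.pyGet?_eq_some_getElem _ h0 (by simpa using h1)]
    simp only [Option.getD_some]
    rw [PySem.List.pyGet?_eq_some_getElem _ hj0 (by omega)]
    simp
  have hgv : PySem.List.pyGetD (towns[i.toNat].take towns.length) j (0 : Int)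
      = towns[i.toNat][j.toNat] := by
    rw [PySem.List.pyGetD_eq_getElem _ _ hj0 (by simp [htake]; omega)]
    simp [List.getElem_take]
  simp only [Function.comp, hgv, hcell]

-- a nonempty house list yields a 1 inside the square
theorem pv_houses_ne (towns : List (List Int)) (h : pv_housesA towns ≠ []) :
    ∃ row ∈ towns, 1 ∈ row.take towns.length := by
  obtain ⟨p, hp⟩ := List.exists_mem_of_ne_nil _ h
  unfold pv_housesA at hp
  rw [List.mem_flatMap] at hp
  obtain ⟨i, hi, hpf⟩ := hp
  rw [List.mem_filterMap] at hpf
  obtain ⟨j, hj, hjf⟩ := hpf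
  rw [PySem.List.mem_pyRange_one] at hi hj
  have hcell : pv_cell towns i j = 1 := by
    by_contra hc; simp [hc] at hjf
  have hrowi : (PySem.List.pyGet? towns i).getD [] = towns[i.toNat] := by
    rw [PySem.List.pyGet?_eq_some_getElem _ hi.1 (by omega)]; rfl
  unfold pv_cell at hcell
  rw [hrowi] at hcell
  set row := towns[i.toNat] with hrowdef
  refine ⟨row, List.getElem_mem _, ?_⟩
  rcases heq : PySem.List.pyGet? row j with _ | v
  · rw [heq] at hcell; simp only [Option.getD_none] at hcell; exact absurd hcell (by norm_num)
  · rw [heq] at hcell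
    simp only [Option.getD_some] at hcell
    subst hcell
    have hjlt : j < (row.length : Int) := by
      by_contra hge
      rw [(PySem.List.pyGet?_eq_none_iff _ _).2 (by unfold PySem.Raise.InRange; omega)] at heq
      exact (Option.some_ne_none 1 heq.symm).elim
    have hjr2 : j.toNat < row.length := by omega
    rw [PySem.List.pyGet?_eq_some_getElem _ hj.1 hjlt] at heq
    have hv : row[j.toNat]'hjr2 = 1 := by injection heq
    have hjn : j.toNat < (row.take towns.length).length := by
      simp only [List.length_take]; omega
    have hmem : (row.take towns.length)[j.toNat]'hjn = 1 := by
      rw [List.getElem_take]; exact hv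
    exact hmem ▸ List.getElem_mem _

-- A's result, written as a sum over its house list
theorem pv_A_eq (ch : List (Int × Int)) (towns : List (List Int)) (ac : List (List Int)) :
    get_all_distance ch towns ac
      = ac.map (fun chicken =>
          ((pv_housesA towns).map (fun xy => rotate_chicken_house chicken ch xy.1 xy.2)).sum) := by
  unfold get_all_distance
  apply List.map_congr_left
  intro chicken _
  exact pv_Acase towns (fun i j => rotate_chicken_house chicken ch i j)

-- B's result, written as the same sum, under the index bounds of Pre_
theorem pv_B_eq (ch : List (Int × Int)) (towns : List (List Int)) (ac : List (List Int))
    (hne : pv_housesA towns ≠ [])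
    (hb : ∀ c ∈ ac, ∀ k ∈ c, -(ch.length : Int) ≤ k ∧ k < (ch.length : Int))
    (hAB : pv_housesB towns = pv_housesA towns) :
    get_all_distance_alt ch towns ac
      = ac.map (fun case_ =>
          ((pv_housesA towns).map (fun xy => rotate_chicken_house case_ ch xy.1 xy.2)).sum) := by
  simp only [get_all_distance_alt, hAB]
  rw [if_neg hne]
  apply List.map_congr_left
  intro c hc
  apply congrArg
  have hcol : ∀ k ∈ c,
      ((PySem.List.pyGet? (ch.map (fun cc => (pv_housesA towns).map
          (fun xy => |xy.1 - cc.1| + |xy.2 - cc.2|))) k).getD [])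
        = (pv_housesA towns).map (fun xy =>
            |xy.1 - ((PySem.List.pyGet? ch k).getD (0, 0)).1|
              + |xy.2 - ((PySem.List.pyGet? ch k).getD (0, 0)).2|) := by
    intro k hk
    obtain ⟨hk0, hk1⟩ := hb c hc k hk
    rcases hsome : PySem.List.pyGet? ch k with _ | cc
    · exact absurd ((PySem.List.pyGet?_eq_none_iff _ _).1 hsome)
        (by unfold PySem.Raise.InRange; omega)
    · rw [pv_pyGet?_map, hsome]
      rfl
  rw [show List.replicate (pv_housesA towns).length (100000000000 : Int)
        = (pv_housesA towns).map (fun _ => (100000000000 : Int)) by simp,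
      pv_zipfold _ (fun k xy =>
        |xy.1 - ((PySem.List.pyGet? ch k).getD (0, 0)).1|
          + |xy.2 - ((PySem.List.pyGet? ch k).getD (0, 0)).2|) c _ _ hcol]
  apply List.map_congr_left
  intro xy _
  rfl

-- ===== VERDICT (by name: the statement is the Claim_ definition above) =====
theorem get_all_distance_spec : Claim_equal_get_all_distance := by
  intro ch towns ac _ hpre
  unfold Spec_get_all_distance
  rcases hpre with hnil | ⟨hrows, hbound⟩
  · subst hnil
    simp [get_all_distance, get_all_distance_alt]
  · have hAB := pv_houses_eq towns hrows
    by_cases hne : pv_housesA towns = []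
    · have hA : get_all_distance ch towns ac = ac.map (fun _ => (0 : Int)) := by
        rw [pv_A_eq]
        apply List.map_congr_left
        intro c _
        rw [hne]
        simp
      rw [hA]
      simp [get_all_distance_alt, hAB, hne]
    · rw [pv_A_eq, pv_B_eq ch towns ac hne (hbound (pv_houses_ne towns hne)) hAB]
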